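-- pv_equiv track=rewrite | github.com/hgg5889-cloud/1 | trading_terminal.py | auto_label_signal
-- ===== SOURCE A (Python) =====
-- def auto_label_signal(entry_price, direction, future_closes):
--     if direction == "long":
--         zhi_ying = entry_price + 30
--         zhi_sun = entry_price - 25
--         for p in future_closes:
--             if p >= zhi_ying:
--                 return "good"
--             if p <= zhi_sun:
--                 return "bad"
--     else:
--         zhi_ying = entry_price - 30
--         zhi_sun = entry_price + 25
--         for p in future_closes:
--             if p <= zhi_ying:
--                 return "good"
--             if p >= zhi_sun:
--                 return "bad"
--     return "neutral"
-- ===== SOURCE B (Python) =====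
-- def auto_label_signal(entry_price, direction, future_closes):
--     if direction == "long":
--         good = lambda p: p >= entry_price + 30
--         bad = lambda p: p <= entry_price - 25
--     else:
--         good = lambda p: p <= entry_price - 30
--         bad = lambda p: p >= entry_price + 25
--     n = len(future_closes)
--     first_good = next((i for i, p in enumerate(future_closes) if good(p)), n)
--     first_bad = next((i for i, p in enumerate(future_closes) if bad(p)), n)
--     if first_good == first_bad:
--         return "neutral"
--     return "good" if first_good < first_bad else "bad"
-- ===== Notes on version B (the rewrite author's own statement) =====
-- stated objective: alternative
-- what changed: Replaces the single interleaved early-exit loop with two independent first-index searches (first close crossing the take-profit vs the stop-loss threshold, sentinel = len when absent) followed by a comparison of the two indices.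
import Mathlib
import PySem

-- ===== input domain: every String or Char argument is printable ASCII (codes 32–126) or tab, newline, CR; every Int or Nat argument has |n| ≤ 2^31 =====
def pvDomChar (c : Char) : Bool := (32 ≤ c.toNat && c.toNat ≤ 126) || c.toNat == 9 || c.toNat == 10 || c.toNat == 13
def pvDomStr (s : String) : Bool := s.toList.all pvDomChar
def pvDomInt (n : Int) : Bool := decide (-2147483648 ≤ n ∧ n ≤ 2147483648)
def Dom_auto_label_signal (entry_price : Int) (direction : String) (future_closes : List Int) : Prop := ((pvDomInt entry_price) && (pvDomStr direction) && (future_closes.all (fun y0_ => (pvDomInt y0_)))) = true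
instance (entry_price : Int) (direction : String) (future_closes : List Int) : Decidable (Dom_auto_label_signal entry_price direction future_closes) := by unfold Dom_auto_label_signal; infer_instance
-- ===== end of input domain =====

-- B replaces A's single interleaved early-exit loop by two independent first-crossing index
-- searches plus a comparison (objective: alternative decomposition; same return values).

-- ===== PORT A =====
-- A's long-direction loop: early-exit scan, take-profit checked first.
def pvLoopLong (zhi_ying zhi_sun : Int) : List Int → String
  | [] => "neutral"
  | p :: ps => if zhi_ying ≤ p then "good" else if p ≤ zhi_sun then "bad" else pvLoopLong zhi_ying zhi_sun ps

-- A's short-direction loop.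
def pvLoopShort (zhi_ying zhi_sun : Int) : List Int → String
  | [] => "neutral"
  | p :: ps => if p ≤ zhi_ying then "good" else if zhi_sun ≤ p then "bad" else pvLoopShort zhi_ying zhi_sun ps

def auto_label_signal (entry_price : Int) (direction : String) (future_closes : List Int) : String :=
  if direction == "long" then
    pvLoopLong (entry_price + 30) (entry_price - 25) future_closes
  else
    pvLoopShort (entry_price - 30) (entry_price + 25) future_closes

-- ===== PORT B =====
-- index of the first element satisfying pred; the list's length when none does (B's sentinel n).
def pvFirstIdx (pred : Int → Bool) : List Int → Nat
  | [] => 0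
  | p :: ps => if pred p then 0 else pvFirstIdx pred ps + 1

def auto_label_signal_alt (entry_price : Int) (direction : String) (future_closes : List Int) : String :=
  let good : Int → Bool := if direction == "long" then (fun p => decide (entry_price + 30 ≤ p)) else (fun p => decide (p ≤ entry_price - 30))
  let bad : Int → Bool := if direction == "long" then (fun p => decide (p ≤ entry_price - 25)) else (fun p => decide (entry_price + 25 ≤ p))
  let first_good := pvFirstIdx good future_closes
  let first_bad := pvFirstIdx bad future_closes
  if first_good = first_bad then "neutral"
  else if first_good < first_bad then "good" else "bad"

-- ===== PRECONDITION & SPEC =====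
def Spec_auto_label_signal (entry_price : Int) (direction : String) (future_closes : List Int) (out : String) : Prop := out = auto_label_signal_alt entry_price direction future_closes
instance (entry_price : Int) (direction : String) (future_closes : List Int) (out : String) : Decidable (Spec_auto_label_signal entry_price direction future_closes out) := by unfold Spec_auto_label_signal; infer_instance

-- ===== CLAIM (what is proved, stated in full; the proofs are below) =====
def Claim_equal_auto_label_signal : Prop := ∀ (entry_price : Int) (direction : String) (future_closes : List Int), Dom_auto_label_signal entry_price direction future_closes → Spec_auto_label_signal entry_price direction future_closes (auto_label_signal entry_price direction future_closes)

-- ===== LEMMAS AND PROOFS =====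
-- Generic bridge: when no element satisfies both predicates at once, the interleaved
-- early-exit loop equals the two-index comparison.
theorem pv_loop_eq_idx (g b : Int → Bool) (hdisj : ∀ p, ¬(g p = true ∧ b p = true))
    (loop : List Int → String)
    (hnil : loop [] = "neutral")
    (hcons : ∀ p ps, loop (p :: ps) = if g p then "good" else if b p then "bad" else loop ps)
    (xs : List Int) :
    loop xs = (if pvFirstIdx g xs = pvFirstIdx b xs then "neutral"
               else if pvFirstIdx g xs < pvFirstIdx b xs then "good" else "bad") := by
  induction xs with
  | nil => simp [hnil, pvFirstIdx]
  | cons p ps ih =>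
      rw [hcons]
      by_cases hg : g p = true
      · have hb : b p = false := by
          cases hb : b p
          · rfl
          · exact absurd ⟨hg, hb⟩ (hdisj p)
        simp [pvFirstIdx, hg, hb]
      · by_cases hb : b p = true
        · simp [pvFirstIdx, hg, hb]
        · simp only [Bool.not_eq_true] at hg hb
          simp only [pvFirstIdx, hg, hb, ih]
          rcases Nat.lt_trichotomy (pvFirstIdx g ps) (pvFirstIdx b ps) with h | h | h <;>
            simp_all <;> omega

-- ===== VERDICT (by name: the statement is the Claim_ definition above) =====
theorem auto_label_signal_spec : Claim_equal_auto_label_signal := by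
  intro e d fc _
  unfold Spec_auto_label_signal auto_label_signal auto_label_signal_alt
  by_cases hd : d == "long"
  · simp only [hd, if_true]
    exact pv_loop_eq_idx _ _ (by intro p h; simp at h; omega) _ rfl
      (fun p ps => by simp [pvLoopLong]) fc
  · simp only [hd, Bool.false_eq_true, if_false]
    exact pv_loop_eq_idx _ _ (by intro p h; simp at h; omega) _ rfl
      (fun p ps => by simp [pvLoopShort]) fc
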